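-- pv_equiv track=rewrite | github.com/juanulloa2050/UR5_CHESS | Main/#ENSAMBLE FINAL.py | tablero_a_FEN
-- ===== SOURCE A (Python) =====
-- def tablero_a_FEN(board_matrix):
--     board_fen = ""
--     for row in board_matrix:
--         empty_count = 0
--         for piece_char in row:
--             if piece_char == "empty":
--                 empty_count += 1
--             else:
--                 if empty_count > 0:
--                     board_fen += str(empty_count)
--                     empty_count = 0
--                 board_fen += piece_char
--         if empty_count > 0:
--             board_fen += str(empty_count)
--         board_fen += "/"
--     return board_fen.rstrip("/")
-- ===== SOURCE B (Python) =====
-- def tablero_a_FEN(board_matrix):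
--     # Run-grouping re-implementation: scan each row as maximal runs of
--     # equal emptiness, emit a count per empty run and the pieces per piece
--     # run, collecting parts in a list joined once at the end.
--     parts = []
--     for row in board_matrix:
--         i, n = 0, len(row)
--         while i < n:
--             j = i
--             while j < n and (row[j] == "empty") == (row[i] == "empty"):
--                 j += 1
--             if row[i] == "empty":
--                 parts.append(str(j - i))
--             else:
--                 parts.extend(row[i:j])
--             i = j
--         parts.append("/")
--     return "".join(parts).rstrip("/")
-- ===== Notes on version B (the rewrite author's own statement) =====
-- stated objective: alternative
-- what changed: Replaces A's stateful empty_count accumulate-and-flush over characters by explicit run grouping per row (two-pointer scan of maximal runs, emitting a count per empty run and the pieces per piece run), collecting parts in a list joined once instead of repeated string concatenation.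
import Mathlib
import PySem

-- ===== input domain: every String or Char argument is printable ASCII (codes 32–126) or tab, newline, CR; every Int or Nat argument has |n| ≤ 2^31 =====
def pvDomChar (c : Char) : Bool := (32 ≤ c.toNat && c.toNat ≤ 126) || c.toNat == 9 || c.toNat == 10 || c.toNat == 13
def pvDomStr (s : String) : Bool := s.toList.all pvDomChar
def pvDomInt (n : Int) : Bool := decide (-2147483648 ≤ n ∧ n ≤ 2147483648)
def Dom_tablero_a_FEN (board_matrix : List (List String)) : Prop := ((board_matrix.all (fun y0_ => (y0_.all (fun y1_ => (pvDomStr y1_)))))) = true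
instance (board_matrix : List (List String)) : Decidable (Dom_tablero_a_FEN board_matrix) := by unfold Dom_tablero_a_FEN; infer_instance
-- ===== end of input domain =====

-- B replaces A's stateful empty_count accumulate-and-flush by explicit run grouping per row (alternative decomposition, same result).

-- shared helper: s.rstrip("/") for the single character '/' (exact: drops every trailing '/')
def pvRstripSlash (s : String) : String :=
  String.ofList ((s.toList.reverse.dropWhile (· == '/')).reverse)

-- ===== PORT A =====
-- the inner loop body: state (board_fen, empty_count)
def pvStepA (st : String × Int) (piece_char : String) : String × Int :=
  if piece_char == "empty" then (st.1, st.2 + 1)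
  else ((if st.2 > 0 then st.1 ++ PySem.Int.toStr st.2 else st.1) ++ piece_char, 0)

-- the flush after the inner loop: if empty_count > 0: board_fen += str(empty_count)
def pvFlushA (st : String × Int) : String :=
  if st.2 > 0 then st.1 ++ PySem.Int.toStr st.2 else st.1

def tablero_a_FEN (board_matrix : List (List String)) : String :=
  pvRstripSlash (board_matrix.foldl
    (fun board_fen row => pvFlushA (row.foldl pvStepA (board_fen, (0 : Int))) ++ "/") "")

-- ===== PORT B =====
-- one row rendered run by run: a maximal run of "empty" cells becomes its count,
-- a maximal run of pieces becomes their concatenation (mirrors Source B's two-pointer run scan)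
def pvSeg (row : List String) : String :=
  match row with
  | [] => ""
  | c :: cs =>
    let b := c == "empty"
    let run := cs.takeWhile (fun x => (x == "empty") == b)
    (if b then PySem.Int.toStr ((1 + run.length : Nat) : Int) else String.join (c :: run)) ++
      pvSeg (cs.dropWhile (fun x => (x == "empty") == b))
termination_by row.length
decreasing_by
  simp only [List.length_cons]
  exact Nat.lt_succ_of_le (List.length_dropWhile_le _ _)

def tablero_a_FEN_alt (board_matrix : List (List String)) : String :=
  pvRstripSlash (board_matrix.foldl (fun acc row => acc ++ pvSeg row ++ "/") "")

-- ===== PRECONDITION & SPEC =====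
def Spec_tablero_a_FEN (board_matrix : List (List String)) (out : String) : Prop := out = tablero_a_FEN_alt board_matrix
instance (board_matrix : List (List String)) (out : String) : Decidable (Spec_tablero_a_FEN board_matrix out) := by unfold Spec_tablero_a_FEN; infer_instance

-- ===== CLAIM (what is proved, stated in full; the proofs are below) =====
def Claim_equal_tablero_a_FEN : Prop := ∀ (board_matrix : List (List String)), Dom_tablero_a_FEN board_matrix → Spec_tablero_a_FEN board_matrix (tablero_a_FEN board_matrix)

-- ===== LEMMAS AND PROOFS =====

theorem pv_join_foldl (l : List String) (a : String) :
    List.foldl (· ++ ·) a l = a ++ List.foldl (· ++ ·) "" l := by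
  induction l generalizing a with
  | nil => simp
  | cons x xs ih =>
    simp only [List.foldl_cons]
    rw [ih (a ++ x), ih (("" : String) ++ x), String.empty_append, String.append_assoc]

theorem pv_join_cons (a : String) (l : List String) :
    String.join (a :: l) = a ++ String.join l := by
  simp only [String.join, List.foldl_cons, String.empty_append]
  exact pv_join_foldl l a

-- stripping the leading piece run of cs and rendering the rest equals rendering cs
theorem pv_seg_pieces (cs : List String) :
    String.join (cs.takeWhile (fun x => (x == "empty") == false)) ++
      pvSeg (cs.dropWhile (fun x => (x == "empty") == false)) = pvSeg cs := by
  cases cs with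
  | nil => simp [pvSeg, String.join]
  | cons d ds =>
    by_cases hd : d = "empty"
    · subst hd
      simp [String.join]
    · have hb : (d == "empty") = false := by simp [hd]
      conv_rhs => rw [pvSeg]
      simp [hb]

theorem pv_seg_piece_cons (c : String) (cs : List String) (hc : c ≠ "empty") :
    pvSeg (c :: cs) = c ++ pvSeg cs := by
  have hb : (c == "empty") = false := by simp [hc]
  rw [pvSeg]
  simp only [hb, Bool.false_eq_true, if_false]
  rw [pv_join_cons, String.append_assoc, pv_seg_pieces]

-- main invariant: the stateful inner loop of A computes, row run by run, B's row rendering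
theorem pv_main (cs : List String) :
    (∀ acc : String, pvFlushA (cs.foldl pvStepA (acc, (0:Int))) = acc ++ pvSeg cs) ∧
    (∀ (acc : String) (k : Nat),
      pvFlushA (cs.foldl pvStepA (acc, (k : Int) + 1)) =
        acc ++ PySem.Int.toStr ((k : Int) + 1 + ((cs.takeWhile (fun x => x == "empty")).length : Int)) ++
          pvSeg (cs.dropWhile (fun x => x == "empty"))) := by
  have hp : (fun x : String => (x == "empty") == true) = (fun x : String => x == "empty") := by
    funext x; simp
  induction cs with
  | nil =>
    refine ⟨fun acc => by simp [pvFlushA, pvSeg], fun acc k => ?_⟩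
    simp only [List.foldl_nil, List.takeWhile_nil, List.dropWhile_nil, List.length_nil,
      Nat.cast_zero, add_zero, pvFlushA, pvSeg, String.append_empty]
    rw [if_pos (by positivity)]
  | cons c cs ih =>
    refine ⟨fun acc => ?_, fun acc k => ?_⟩
    · by_cases hc : c = "empty"
      · subst hc
        have h1 : pvStepA (acc, (0:Int)) "empty" = (acc, ((0:Nat):Int) + 1) := by
          simp [pvStepA]
        simp only [List.foldl_cons, h1]
        rw [ih.2 acc 0]
        conv_rhs => rw [pvSeg]
        simp only [beq_self_eq_true, if_true, hp]
        rw [String.append_assoc,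
          show ((0:Nat):Int) + 1 + ((cs.takeWhile (fun x => x == "empty")).length : Int)
              = (((1 + (cs.takeWhile (fun x => x == "empty")).length : Nat)) : Int) by push_cast; ring]
      · have hb : (c == "empty") = false := by simp [hc]
        have h1 : pvStepA (acc, (0:Int)) c = (acc ++ c, 0) := by
          simp [pvStepA, hb]
        simp only [List.foldl_cons, h1]
        rw [ih.1 (acc ++ c), pv_seg_piece_cons c cs hc, String.append_assoc]
    · by_cases hc : c = "empty"
      · subst hc
        have h1 : pvStepA (acc, (k:Int)+1) "empty" = (acc, ((k+1 : Nat) : Int) + 1) := by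
          simp [pvStepA]
        simp only [List.foldl_cons, h1]
        rw [ih.2 acc (k+1)]
        simp only [List.takeWhile_cons, List.dropWhile_cons, beq_self_eq_true, if_true,
          List.length_cons]
        rw [show ((k+1:Nat):Int) + 1 + ((cs.takeWhile (fun x => x == "empty")).length : Int)
              = ((k:Nat):Int) + 1 + (((cs.takeWhile (fun x => x == "empty")).length + 1 : Nat) : Int) by push_cast; ring]
      · have hb : (c == "empty") = false := by simp [hc]
        have h1 : pvStepA (acc, (k:Int)+1) c =
            (acc ++ PySem.Int.toStr ((k:Int)+1) ++ c, 0) := by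
          simp only [pvStepA, hb, Bool.false_eq_true, if_false]
          rw [if_pos (by positivity)]
        simp only [List.foldl_cons, h1]
        rw [ih.1 (acc ++ PySem.Int.toStr ((k:Int)+1) ++ c)]
        simp only [List.takeWhile_cons, List.dropWhile_cons, hb, Bool.false_eq_true, if_false,
          List.length_nil, Nat.cast_zero, add_zero]
        rw [pv_seg_piece_cons c cs hc]
        simp [String.append_assoc]

theorem pv_outer (rows : List (List String)) (acc : String) :
    rows.foldl (fun board_fen row => pvFlushA (row.foldl pvStepA (board_fen, (0:Int))) ++ "/") acc =
      rows.foldl (fun acc row => acc ++ pvSeg row ++ "/") acc := by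
  induction rows generalizing acc with
  | nil => rfl
  | cons r rs ih =>
    simp only [List.foldl_cons]
    rw [(pv_main r).1 acc, ih, String.append_assoc]

-- ===== VERDICT (by name: the statement is the Claim_ definition above) =====
theorem tablero_a_FEN_spec : Claim_equal_tablero_a_FEN := by
  intro bm _
  unfold Spec_tablero_a_FEN tablero_a_FEN tablero_a_FEN_alt
  rw [pv_outer]
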